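-- pv_equiv track=rewrite | github.com/syncerpn/leetcode | 3803_count_residue_prefixes.py | residuePrefixes
-- ===== SOURCE A (Python) =====
-- def residuePrefixes(s: str) -> int:
--     v = set()
--     ans = 0
--     for i, c in enumerate(s):
--         if c not in v:
--             v.add(c)
--         if len(v) == (i + 1) % 3:
--             ans += 1
--         elif len(v) > 2:
--             break
--     return ans
-- ===== SOURCE B (Python) =====
-- def residuePrefixes(s: str) -> int:
--     # Find the breakpoints: a = index where the 2nd distinct char appears,
--     # b = index where the 3rd distinct char appears (each defaults to len(s)),
--     # then count the matching prefixes with closed-form modular arithmetic.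
--     n = len(s)
--     a = b = n
--     seen = set()
--     for i, c in enumerate(s):
--         if c not in seen:
--             seen.add(c)
--             if len(seen) == 2 and a == n:
--                 a = i
--             elif len(seen) == 3:
--                 b = i
--                 break
--     return (a + 2) // 3 + (b + 1) // 3 - (a + 1) // 3
-- ===== Notes on version B (the rewrite author's own statement) =====
-- stated objective: alternative
-- what changed: Instead of testing len(set)==(i+1)%3 at every index, B scans only for the two breakpoints where the 2nd and 3rd distinct characters first appear and computes the answer by closed-form counts of indices in each region congruent to the matching residue mod 3.
import Mathlib
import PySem

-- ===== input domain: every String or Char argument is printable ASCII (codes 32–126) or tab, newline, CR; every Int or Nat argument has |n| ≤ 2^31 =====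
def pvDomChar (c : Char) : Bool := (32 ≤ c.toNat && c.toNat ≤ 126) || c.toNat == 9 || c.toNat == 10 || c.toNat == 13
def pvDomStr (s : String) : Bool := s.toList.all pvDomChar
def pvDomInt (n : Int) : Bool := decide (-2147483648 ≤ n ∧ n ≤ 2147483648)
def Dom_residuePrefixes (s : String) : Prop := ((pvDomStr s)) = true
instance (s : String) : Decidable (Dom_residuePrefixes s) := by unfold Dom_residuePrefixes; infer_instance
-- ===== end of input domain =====

-- B replaces A's per-index residue test by a breakpoint scan plus closed-form modular counting (objective: alternative decomposition).

-- ===== PORT A =====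
-- A's loop: v = set of distinct chars so far, ans counter, break when len(v) > 2 without a match.
def residuePrefixesLoopA : List Char → Int → PySem.Set Char → Int → Int
  | [], _, _, ans => ans
  | c :: rest, i, v, ans =>
    let v' := if PySem.Set.contains v c then v else PySem.Set.add v c
    if PySem.Set.len v' = PySem.Int.mod (i + 1) 3 then
      residuePrefixesLoopA rest (i + 1) v' (ans + 1)
    else if PySem.Set.len v' > 2 then ans
    else residuePrefixesLoopA rest (i + 1) v' ans

def residuePrefixes (s : String) : Int :=
  residuePrefixesLoopA s.toList 0 PySem.Set.empty 0

-- ===== PORT B =====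
-- B's loop: find a = index of 2nd distinct char, b = index of 3rd distinct char (defaults n).
def residuePrefixesLoopB : List Char → Int → PySem.Set Char → Int → Int → Int → Int × Int
  | [], _, _, _, a, b => (a, b)
  | c :: rest, i, seen, n, a, b =>
    if PySem.Set.contains seen c then residuePrefixesLoopB rest (i + 1) seen n a b
    else
      let seen' := PySem.Set.add seen c
      if PySem.Set.len seen' = 2 ∧ a = n then
        residuePrefixesLoopB rest (i + 1) seen' n i b
      else if PySem.Set.len seen' = 3 then (a, i)
      else residuePrefixesLoopB rest (i + 1) seen' n a b

def residuePrefixes_alt (s : String) : Int :=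
  let n : Int := PySem.Str.len s
  let r := residuePrefixesLoopB s.toList 0 PySem.Set.empty n n n
  PySem.Int.floordiv (r.1 + 2) 3 + PySem.Int.floordiv (r.2 + 1) 3 - PySem.Int.floordiv (r.1 + 1) 3

-- ===== PRECONDITION & SPEC =====
def Spec_residuePrefixes (s : String) (out : Int) : Prop := out = residuePrefixes_alt s
instance (s : String) (out : Int) : Decidable (Spec_residuePrefixes s out) := by unfold Spec_residuePrefixes; infer_instance

-- ===== CLAIM (what is proved, stated in full; the proofs are below) =====
def Claim_equal_residuePrefixes : Prop := ∀ (s : String), Dom_residuePrefixes s → Spec_residuePrefixes s (residuePrefixes s)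

-- ===== LEMMAS AND PROOFS =====

-- count of k in [lo, hi) with k % 3 = 0 (resp. 1), as a difference of closed forms
def cnt0 (lo hi : Int) : Int := (hi + 2) / 3 - (lo + 2) / 3
def cnt1 (lo hi : Int) : Int := (hi + 1) / 3 - (lo + 1) / 3

lemma loopA_acc (l : List Char) (i : Int) (v : PySem.Set Char) (ans : Int) :
    residuePrefixesLoopA l i v ans = ans + residuePrefixesLoopA l i v 0 := by
  induction l generalizing i v ans with
  | nil => simp [residuePrefixesLoopA]
  | cons c rest ih =>
    by_cases hc : PySem.Set.contains v c = true
    · simp only [residuePrefixesLoopA, hc, if_true]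
      split_ifs with h1 h2
      · rw [ih (i + 1) v (ans + 1), ih (i + 1) v (0 + 1)]; ring
      · omega
      · exact ih (i + 1) v ans
    · have hc' : PySem.Set.contains v c = false := by simpa using hc
      simp only [residuePrefixesLoopA, hc', Bool.false_eq_true, if_false]
      split_ifs with h1 h2
      · rw [ih (i + 1) _ (ans + 1), ih (i + 1) _ (0 + 1)]; ring
      · omega
      · exact ih (i + 1) _ ans

lemma len_add_not_mem {v : PySem.Set Char} {c : Char} (h : c ∉ v) :
    PySem.Set.len (PySem.Set.add v c) = PySem.Set.len v + 1 := by
  rw [PySem.Set.add_of_not_mem h]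
  simp [PySem.Set.len]

lemma loopB_fst2 (l : List Char) (i : Int) (v : PySem.Set Char) (n a b : Int)
    (hv : PySem.Set.len v = 2) :
    (residuePrefixesLoopB l i v n a b).1 = a := by
  induction l generalizing i b with
  | nil => rfl
  | cons c rest ih =>
    by_cases hc : PySem.Set.contains v c = true
    · simp only [residuePrefixesLoopB, hc, if_true]; exact ih _ _
    · have hc' : PySem.Set.contains v c = false := by simpa using hc
      have hnm : c ∉ v := fun hm => hc ((PySem.Set.contains_iff v c).mpr hm)
      have h3 : PySem.Set.len (PySem.Set.add v c) = 3 := by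
        rw [len_add_not_mem hnm, hv]; norm_num
      simp only [residuePrefixesLoopB, hc', Bool.false_eq_true, if_false, h3]
      norm_num

-- phase 2: two distinct chars seen; A counts indices ≡ 1 (mod 3) until the 3rd distinct char
lemma phase2 (l : List Char) (i : Int) (v : PySem.Set Char) (n a : Int)
    (hv : PySem.Set.len v = 2) :
    residuePrefixesLoopA l i v 0 =
      cnt1 i ((residuePrefixesLoopB l i v n a (i + l.length)).2) := by
  induction l generalizing i a with
  | nil => simp [residuePrefixesLoopA, residuePrefixesLoopB, cnt1]
  | cons c rest ih =>
    have hmod : PySem.Int.mod (i + 1) 3 = (i + 1) % 3 :=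
      PySem.Int.mod_eq_emod_of_pos (by norm_num)
    have hn : i + ((c :: rest).length : Int) = (i + 1) + rest.length := by
      simp; ring
    by_cases hc : PySem.Set.contains v c = true
    · have hB : residuePrefixesLoopB (c :: rest) i v n a (i + (c :: rest).length) =
          residuePrefixesLoopB rest (i + 1) v n a ((i + 1) + rest.length) := by
        rw [hn]; simp only [residuePrefixesLoopB, hc, if_true]
      rw [hB]
      simp only [residuePrefixesLoopA, hc, if_true, hmod, hv]
      rw [loopA_acc rest (i + 1) v (0 + 1), ih (i + 1) a]
      unfold cnt1
      generalize (residuePrefixesLoopB rest (i + 1) v n a (i + 1 + (rest.length : Int))).2 = B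
      split_ifs <;> omega
    · have hc' : PySem.Set.contains v c = false := by simpa using hc
      have hnm : c ∉ v := fun hm => hc ((PySem.Set.contains_iff v c).mpr hm)
      have h3 : PySem.Set.len (PySem.Set.add v c) = 3 := by
        rw [len_add_not_mem hnm, hv]; norm_num
      have hB : (residuePrefixesLoopB (c :: rest) i v n a (i + (c :: rest).length)).2 = i := by
        simp only [residuePrefixesLoopB, hc', Bool.false_eq_true, if_false, h3]
        norm_num
      rw [hB]
      simp only [residuePrefixesLoopA, hc', Bool.false_eq_true, if_false, h3, hmod]
      have hne : ¬ ((3 : Int) = (i + 1) % 3) := by omega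
      simp only [hne, if_false, cnt1]
      norm_num

-- phase 1: one distinct char seen; A counts ≡ 0 until the 2nd distinct char, then ≡ 1 until the 3rd
lemma phase1 (l : List Char) (i : Int) (v : PySem.Set Char)
    (hv : PySem.Set.len v = 1) :
    residuePrefixesLoopA l i v 0 =
      cnt0 i ((residuePrefixesLoopB l i v (i + l.length) (i + l.length) (i + l.length)).1) +
      cnt1 ((residuePrefixesLoopB l i v (i + l.length) (i + l.length) (i + l.length)).1)
           ((residuePrefixesLoopB l i v (i + l.length) (i + l.length) (i + l.length)).2) := by
  induction l generalizing i with
  | nil => simp [residuePrefixesLoopA, residuePrefixesLoopB, cnt0, cnt1]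
  | cons c rest ih =>
    have hmod : PySem.Int.mod (i + 1) 3 = (i + 1) % 3 :=
      PySem.Int.mod_eq_emod_of_pos (by norm_num)
    have hn : i + ((c :: rest).length : Int) = (i + 1) + rest.length := by
      simp; ring
    by_cases hc : PySem.Set.contains v c = true
    · have hB : residuePrefixesLoopB (c :: rest) i v (i + (c :: rest).length)
            (i + (c :: rest).length) (i + (c :: rest).length) =
          residuePrefixesLoopB rest (i + 1) v ((i + 1) + rest.length)
            ((i + 1) + rest.length) ((i + 1) + rest.length) := by
        rw [hn]; simp only [residuePrefixesLoopB, hc, if_true]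
      rw [hB]
      simp only [residuePrefixesLoopA, hc, if_true, hmod, hv]
      rw [loopA_acc rest (i + 1) v (0 + 1), ih (i + 1)]
      unfold cnt0 cnt1
      generalize (residuePrefixesLoopB rest (i + 1) v (i + 1 + (rest.length : Int))
        (i + 1 + (rest.length : Int)) (i + 1 + (rest.length : Int))).1 = A
      generalize (residuePrefixesLoopB rest (i + 1) v (i + 1 + (rest.length : Int))
        (i + 1 + (rest.length : Int)) (i + 1 + (rest.length : Int))).2 = B
      split_ifs <;> omega
    · have hc' : PySem.Set.contains v c = false := by simpa using hc
      have hnm : c ∉ v := fun hm => hc ((PySem.Set.contains_iff v c).mpr hm)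
      have h2 : PySem.Set.len (PySem.Set.add v c) = 2 := by
        rw [len_add_not_mem hnm, hv]; norm_num
      have hB : residuePrefixesLoopB (c :: rest) i v (i + (c :: rest).length)
            (i + (c :: rest).length) (i + (c :: rest).length) =
          residuePrefixesLoopB rest (i + 1) (PySem.Set.add v c) ((i + 1) + rest.length)
            i ((i + 1) + rest.length) := by
        rw [hn]
        simp only [residuePrefixesLoopB, hc', Bool.false_eq_true, if_false, h2]
        norm_num
      rw [hB, loopB_fst2 rest (i + 1) (PySem.Set.add v c) _ i _ h2]
      simp only [residuePrefixesLoopA, hc', Bool.false_eq_true, if_false, h2, hmod]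
      rw [loopA_acc rest (i + 1) (PySem.Set.add v c) (0 + 1),
        phase2 rest (i + 1) (PySem.Set.add v c) ((i + 1) + rest.length) i h2]
      unfold cnt0 cnt1
      generalize (residuePrefixesLoopB rest (i + 1) (PySem.Set.add v c)
        (i + 1 + (rest.length : Int)) i (i + 1 + (rest.length : Int))).2 = B
      split_ifs <;> omega

-- ===== VERDICT (by name: the statement is the Claim_ definition above) =====
theorem residuePrefixes_spec : Claim_equal_residuePrefixes := by
  intro s _
  unfold Spec_residuePrefixes residuePrefixes residuePrefixes_alt
  rw [PySem.Str.len_eq]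
  rcases hl : s.toList with _ | ⟨c, rest⟩
  · simp [residuePrefixesLoopA, residuePrefixesLoopB, PySem.Int.floordiv]
  · simp only []
    have hc' : PySem.Set.contains (PySem.Set.empty : PySem.Set Char) c = false := rfl
    have hnm : c ∉ (PySem.Set.empty : PySem.Set Char) := by simp [PySem.Set.empty]
    have h1 : PySem.Set.len (PySem.Set.add PySem.Set.empty c) = 1 := by
      rw [len_add_not_mem hnm]; rfl
    have hmod : PySem.Int.mod ((0 : Int) + 1) 3 = 1 := by decide
    have hn : ((c :: rest).length : Int) = 1 + rest.length := by simp; ring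
    have hA : residuePrefixesLoopA (c :: rest) 0 PySem.Set.empty 0 =
        1 + residuePrefixesLoopA rest 1 (PySem.Set.add PySem.Set.empty c) 0 := by
      simp only [residuePrefixesLoopA, hc', Bool.false_eq_true, if_false, hmod, h1, if_true]
      rw [loopA_acc rest (0 + 1) _ (0 + 1)]
      norm_num
    have hB : residuePrefixesLoopB (c :: rest) 0 PySem.Set.empty
          ((c :: rest).length : Int) ((c :: rest).length : Int) ((c :: rest).length : Int) =
        residuePrefixesLoopB rest 1 (PySem.Set.add PySem.Set.empty c)
          (1 + rest.length) (1 + rest.length) (1 + rest.length) := by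
      rw [hn]
      simp only [residuePrefixesLoopB, hc', Bool.false_eq_true, if_false, h1]
      norm_num
    have hph := phase1 rest 1 (PySem.Set.add PySem.Set.empty c) h1
    rw [hA, hB]
    rw [hph]
    rw [PySem.Int.floordiv_eq_ediv_of_pos (by norm_num),
        PySem.Int.floordiv_eq_ediv_of_pos (by norm_num),
        PySem.Int.floordiv_eq_ediv_of_pos (by norm_num)]
    unfold cnt0 cnt1
    generalize (residuePrefixesLoopB rest 1 (PySem.Set.add PySem.Set.empty c)
      (1 + (rest.length : Int)) (1 + (rest.length : Int)) (1 + (rest.length : Int))).1 = A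
    generalize (residuePrefixesLoopB rest 1 (PySem.Set.add PySem.Set.empty c)
      (1 + (rest.length : Int)) (1 + (rest.length : Int)) (1 + (rest.length : Int))).2 = B
    omega
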